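-- pv_equiv track=rewrite | github.com/Rif-7/leetcode_solutions | maxSumMinProduct.py | maxSumMinProduct
-- ===== SOURCE A (Python) =====
-- def maxSumMinProduct(nums) -> int:
--     prefix = [0]
--     for n in nums:
--         prefix.append(prefix[-1] + n)
--
--     res = 0
--     stack = []
--     for i, n in enumerate(nums):
--         newStart = i
--         while stack and stack[-1][1] > n:
--             ind, val = stack.pop()
--             total = prefix[i] - prefix[ind]
--             res = max(res, total * val)
--             newStart = ind
--         stack.append((newStart, n))
--
--     for ind, val in stack:
--         total = prefix[-1] - prefix[ind]
--         res = max(res, total * val)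
--     return res % (10**9 + 7)
-- ===== SOURCE B (Python) =====
-- def maxSumMinProduct(nums) -> int:
--     n = len(nums)
--     prefix = [0]
--     for x in nums:
--         prefix.append(prefix[-1] + x)
--
--     res = 0
--     for i in range(n):
--         l = i - 1
--         while l >= 0 and nums[l] > nums[i]:
--             l -= 1
--         r = i + 1
--         while r < n and nums[r] >= nums[i]:
--             r += 1
--         res = max(res, nums[i] * (prefix[r] - prefix[l + 1]))
--     return res % (10**9 + 7)
-- ===== Notes on version B (the rewrite author's own statement) =====
-- stated objective: alternative
-- what changed: A's single left-to-right monotonic-stack sweep (popping entries and folding candidates in pop order, plus a final stack drain) is replaced by per-element boundary scans: for each i, B scans left for the nearest index with value <= nums[i] and right for the nearest index with value < nums[i], and one flat loop maximises nums[i]*(prefix[r]-prefix[l+1]).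
import Mathlib
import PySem

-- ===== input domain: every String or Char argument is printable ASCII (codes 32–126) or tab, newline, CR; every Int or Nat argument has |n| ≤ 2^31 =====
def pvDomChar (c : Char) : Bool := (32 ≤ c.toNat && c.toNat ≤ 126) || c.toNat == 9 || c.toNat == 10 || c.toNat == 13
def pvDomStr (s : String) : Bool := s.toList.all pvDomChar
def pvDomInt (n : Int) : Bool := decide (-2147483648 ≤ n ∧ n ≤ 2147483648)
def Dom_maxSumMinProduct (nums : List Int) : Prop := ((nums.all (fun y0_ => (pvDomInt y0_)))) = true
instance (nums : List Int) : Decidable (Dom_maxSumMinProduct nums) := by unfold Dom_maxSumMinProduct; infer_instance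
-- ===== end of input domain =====

-- B replaces A's single monotonic-stack sweep by per-element boundary scans (nearest previous value ≤, nearest next value <)
-- and one flat candidate loop: an alternative decomposition of the same O(n)-space task (not claimed faster).

-- ===== PORT A =====
-- prefix = [0]; for n in nums: prefix.append(prefix[-1] + n)
def pvPrefixA (nums : List Int) : List Int :=
  nums.foldl (fun pref x => pref ++ [PySem.List.pyGetD pref (-1) 0 + x]) [0]

-- the inner `while stack and stack[-1][1] > n` loop; the Python list's top is our list head;
-- all prefix indices are in range, so pyGetD is exact.
def pvPopA (pre : List Int) (i v : Int) :
    Int → List (Int × Int) → Int → Int × List (Int × Int) × Int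
  | res, [], s => (res, [], s)
  | res, (ind, val) :: rest, s =>
    if val > v then
      pvPopA pre i v (max res ((PySem.List.pyGetD pre i 0 - PySem.List.pyGetD pre ind 0) * val)) rest ind
    else (res, (ind, val) :: rest, s)

def maxSumMinProduct (nums : List Int) : Int :=
  let pre := pvPrefixA nums
  let st := (PySem.List.enumerate nums 0).foldl
    (fun (st : Int × List (Int × Int)) p =>
      let r := pvPopA pre p.1 p.2 st.1 st.2 p.1
      (r.1, (r.2.2, p.2) :: r.2.1))
    ((0 : Int), ([] : List (Int × Int)))
  -- `for ind, val in stack` iterates bottom-to-top, i.e. over the reverse of our head-is-top list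
  let res := st.2.reverse.foldl
    (fun res e => max res ((PySem.List.pyGetD pre (-1) 0 - PySem.List.pyGetD pre e.1 0) * e.2)) st.1
  PySem.Int.mod res (10 ^ 9 + 7)

-- ===== PORT B =====
def pvPrefixB (nums : List Int) : List Int :=
  nums.foldl (fun pref x => pref ++ [PySem.List.pyGetD pref (-1) 0 + x]) [0]

-- while l >= 0 and nums[l] > v: l -= 1
def pvFindLeftI (nums : List Int) (v : Int) (l : Int) : Int :=
  if h : 0 ≤ l ∧ PySem.List.pyGetD nums l 0 > v then pvFindLeftI nums v (l - 1) else l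
termination_by (l + 1).toNat
decreasing_by omega

-- while r < n and nums[r] >= v: r += 1
def pvFindRightI (nums : List Int) (v : Int) (r : Int) : Int :=
  if h : r < PySem.List.len nums ∧ PySem.List.pyGetD nums r 0 ≥ v then pvFindRightI nums v (r + 1) else r
termination_by (PySem.List.len nums - r).toNat
decreasing_by simp only [PySem.List.len_eq] at h ⊢; omega

def maxSumMinProduct_alt (nums : List Int) : Int :=
  let n := PySem.List.len nums
  let pre := pvPrefixB nums
  let res := (PySem.List.pyRange 0 n 1).foldl
    (fun res i =>
      let l := pvFindLeftI nums (PySem.List.pyGetD nums i 0) (i - 1)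
      let r := pvFindRightI nums (PySem.List.pyGetD nums i 0) (i + 1)
      max res (PySem.List.pyGetD nums i 0 * (PySem.List.pyGetD pre r 0 - PySem.List.pyGetD pre (l + 1) 0)))
    (0 : Int)
  PySem.Int.mod res (10 ^ 9 + 7)

-- ===== PRECONDITION & SPEC =====
def Spec_maxSumMinProduct (nums : List Int) (out : Int) : Prop := out = maxSumMinProduct_alt nums
instance (nums : List Int) (out : Int) : Decidable (Spec_maxSumMinProduct nums out) := by unfold Spec_maxSumMinProduct; infer_instance

-- ===== CLAIM (what is proved, stated in full; the proofs are below) =====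
def Claim_equal_maxSumMinProduct : Prop := ∀ (nums : List Int), Dom_maxSumMinProduct nums → Spec_maxSumMinProduct nums (maxSumMinProduct nums)

-- ===== LEMMAS AND PROOFS =====

/-- `nums[j]` for a valid index. -/
def pvA (nums : List Int) (j : Nat) : Int := nums.getD j 0

/-- sum of the first `k` elements = `prefix[k]`. -/
def pvPS (nums : List Int) (k : Nat) : Int := (nums.take k).sum

/-- index `i` survives on the stack after the first `k` elements were processed. -/
def pvKeep (nums : List Int) (k i : Nat) : Bool :=
  decide (∀ j, j < k → i < j → pvA nums i ≤ pvA nums j)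

def pvS (nums : List Int) (k : Nat) : List Nat := (List.range k).filter (pvKeep nums k)

def pvP (nums : List Int) (k : Nat) : List Nat := (List.range k).filter (fun i => !pvKeep nums k i)

/-- B's left boundary (as `l + 1`, an Int). -/
def pvStart (nums : List Int) (i : Nat) : Int := pvFindLeftI nums (pvA nums i) ((i : Int) - 1) + 1

/-- B's right boundary. -/
def pvR (nums : List Int) (i : Nat) : Int := pvFindRightI nums (pvA nums i) ((i : Int) + 1)

/-- B's candidate for index `i`. -/
def pvCand (nums : List Int) (i : Nat) : Int :=
  pvA nums i * (pvPS nums (pvR nums i).toNat - pvPS nums (pvStart nums i).toNat)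

def pvF (nums : List Int) (l : List Nat) : Int := l.foldl (fun r i => max r (pvCand nums i)) 0

def pvEntry (nums : List Int) (i : Nat) : Int × Int := (pvStart nums i, pvA nums i)

lemma pvKeep_iff (nums : List Int) (k i : Nat) :
    pvKeep nums k i = true ↔ (∀ j, j < k → i < j → pvA nums i ≤ pvA nums j) := by
  simp [pvKeep]

lemma mem_pvS (nums : List Int) (k i : Nat) :
    i ∈ pvS nums k ↔ i < k ∧ (∀ j, j < k → i < j → pvA nums i ≤ pvA nums j) := by
  simp [pvS, List.mem_filter, List.mem_range, pvKeep_iff]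

lemma mem_pvP (nums : List Int) (k i : Nat) :
    i ∈ pvP nums k ↔ i < k ∧ ¬ (∀ j, j < k → i < j → pvA nums i ≤ pvA nums j) := by
  simp only [pvP, List.mem_filter, List.mem_range, Bool.not_eq_true', ← pvKeep_iff]
  constructor
  · rintro ⟨h1, h2⟩; exact ⟨h1, by simp [h2]⟩
  · rintro ⟨h1, h2⟩; exact ⟨h1, by revert h2; cases pvKeep nums k i <;> simp⟩

lemma pvS_sorted (nums : List Int) (k : Nat) : (pvS nums k).Pairwise (· < ·) :=
  (List.pairwise_lt_range).filter _

lemma pvS_nodup (nums : List Int) (k : Nat) : (pvS nums k).Nodup :=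
  (pvS_sorted nums k).imp (fun h => Nat.ne_of_lt h)

lemma pvP_nodup (nums : List Int) (k : Nat) : (pvP nums k).Nodup :=
  (List.nodup_range).filter _

-- ---------- findLeft / findRight characterisations ----------

lemma pvFL_neg (nums : List Int) (v : Int) (i : Nat)
    (h : ∀ t, t < i → v < pvA nums t) : pvFindLeftI nums v ((i : Int) - 1) = -1 := by
  induction i with
  | zero => rw [pvFindLeftI]; norm_num
  | succ m ih =>
    rw [pvFindLeftI]
    have h1 : ((m + 1 : Nat) : Int) - 1 = ((m : Nat) : Int) := by push_cast; ring
    rw [h1]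
    have h2 : PySem.List.pyGetD nums ((m : Nat) : Int) 0 = pvA nums m := by
      rw [PySem.List.pyGetD_natCast]; rfl
    rw [dif_pos ⟨Int.natCast_nonneg m, by rw [h2]; exact h m (Nat.lt_succ_self m)⟩]
    exact ih (fun t ht => h t (Nat.lt_succ_of_lt ht))

lemma pvFL_pos (nums : List Int) (v : Int) (i j : Nat)
    (hj : j < i) (hle : pvA nums j ≤ v) (hgt : ∀ t, j < t → t < i → v < pvA nums t) :
    pvFindLeftI nums v ((i : Int) - 1) = (j : Int) := by
  induction i with
  | zero => omega
  | succ m ih =>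
    rw [pvFindLeftI]
    have h1 : ((m + 1 : Nat) : Int) - 1 = ((m : Nat) : Int) := by push_cast; ring
    rw [h1]
    have h2 : PySem.List.pyGetD nums ((m : Nat) : Int) 0 = pvA nums m := by
      rw [PySem.List.pyGetD_natCast]; rfl
    rcases Nat.lt_or_ge j m with hjm | hjm
    · rw [dif_pos ⟨Int.natCast_nonneg m, by rw [h2]; exact hgt m hjm (Nat.lt_succ_self m)⟩]
      exact ih hjm (fun t ht1 ht2 => hgt t ht1 (Nat.lt_succ_of_lt ht2))
    · have hje : j = m := by omega
      subst hje
      rw [dif_neg (by rw [h2]; simp only [not_and, not_lt]; intro _; exact hle)]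

lemma pvFL_bounds (nums : List Int) (v : Int) (l : Int) (h : -1 ≤ l) :
    -1 ≤ pvFindLeftI nums v l ∧ pvFindLeftI nums v l ≤ l := by
  rw [pvFindLeftI]
  split
  · rename_i hc
    have := pvFL_bounds nums v (l - 1) (by omega)
    omega
  · omega
termination_by (l + 1).toNat
decreasing_by omega

lemma pvFR_pos (nums : List Int) (v : Int) (i k : Nat)
    (hik : i < k) (hk : k < nums.length) (hlt : pvA nums k < v)
    (hge : ∀ t, i < t → t < k → v ≤ pvA nums t) :
    pvFindRightI nums v ((i : Int) + 1) = (k : Int) := by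
  rw [pvFindRightI]
  have h1 : ((i : Int) + 1) = ((i + 1 : Nat) : Int) := by push_cast; ring
  have h2 : PySem.List.pyGetD nums ((i + 1 : Nat) : Int) 0 = pvA nums (i + 1) := by
    rw [PySem.List.pyGetD_natCast]; rfl
  rcases Nat.lt_or_ge (i + 1) k with hik1 | hik1
  · rw [dif_pos ⟨by simp only [PySem.List.len_eq]; omega,
      by rw [h1, h2]; exact hge (i + 1) (Nat.lt_succ_self i) hik1⟩]
    have := pvFR_pos nums v (i + 1) k hik1 hk hlt (fun t ht1 ht2 => hge t (by omega) ht2)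
    rw [← this]; norm_num
  · have hke : k = i + 1 := by omega
    subst hke
    rw [dif_neg (by rw [h1, h2]; simp only [not_and, not_le]; intro _; exact hlt)]
    exact h1
termination_by k - i
decreasing_by omega

lemma pvFR_top (nums : List Int) (v : Int) (i : Nat) (hi : i < nums.length)
    (hge : ∀ t, i < t → t < nums.length → v ≤ pvA nums t) :
    pvFindRightI nums v ((i : Int) + 1) = (nums.length : Int) := by
  rw [pvFindRightI]
  have h1 : ((i : Int) + 1) = ((i + 1 : Nat) : Int) := by push_cast; ring
  have h2 : PySem.List.pyGetD nums ((i + 1 : Nat) : Int) 0 = pvA nums (i + 1) := by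
    rw [PySem.List.pyGetD_natCast]; rfl
  rcases Nat.lt_or_ge (i + 1) nums.length with hik1 | hik1
  · rw [dif_pos ⟨by simp only [PySem.List.len_eq]; omega,
      by rw [h1, h2]; exact hge (i + 1) (Nat.lt_succ_self i) hik1⟩]
    have := pvFR_top nums v (i + 1) hik1 (fun t ht1 ht2 => hge t (by omega) ht2)
    rw [← this]; norm_num
  · rw [dif_neg (by simp only [PySem.List.len_eq]; rintro ⟨ha, -⟩; omega)]
    omega
termination_by nums.length - i
decreasing_by omega

lemma pvFR_bounds (nums : List Int) (v : Int) (r : Int) (h0 : 0 ≤ r) (h : r ≤ (nums.length : Int)) :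
    r ≤ pvFindRightI nums v r ∧ pvFindRightI nums v r ≤ (nums.length : Int) := by
  rw [pvFindRightI]
  split
  · rename_i hc
    simp only [PySem.List.len_eq] at hc
    have := pvFR_bounds nums v (r + 1) (by omega) (by omega)
    omega
  · omega
termination_by (PySem.List.len nums - r).toNat
decreasing_by simp only [PySem.List.len_eq] at *; omega

-- ---------- prefix list ----------

lemma pvPrefixA_eq (nums : List Int) :
    pvPrefixA nums = (List.range (nums.length + 1)).map (pvPS nums) := by
  induction nums using List.reverseRecOn with
  | nil => simp [pvPrefixA, pvPS]
  | append_singleton l x ih =>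
    have hstep : pvPrefixA (l ++ [x]) =
        pvPrefixA l ++ [PySem.List.pyGetD (pvPrefixA l) (-1) 0 + x] := by
      simp [pvPrefixA, List.foldl_append]
    rw [hstep, ih]
    have hlast : PySem.List.pyGetD ((List.range (l.length + 1)).map (pvPS l)) (-1) 0 = pvPS l l.length := by
      rw [List.range_succ, List.map_append]
      exact PySem.List.pyGetD_neg_one_append_singleton _ _ _
    rw [hlast]
    have hlen : (l ++ [x]).length + 1 = (l.length + 1) + 1 := by simp
    rw [hlen, List.range_succ (n := l.length + 1), List.map_append]
    congr 1
    · apply List.map_congr_left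
      intro k hk
      simp only [List.mem_range] at hk
      simp only [pvPS]
      rw [List.take_append_of_le_length (by omega)]
    · simp only [pvPS, List.map_cons, List.map_nil]
      rw [List.take_of_length_le (by simp)]
      simp

lemma pvPre_getD (nums : List Int) (j : Int) (h0 : 0 ≤ j) (hn : j ≤ (nums.length : Int)) :
    PySem.List.pyGetD (pvPrefixA nums) j 0 = pvPS nums j.toNat := by
  have hj : j = ((j.toNat : Nat) : Int) := by omega
  rw [hj, PySem.List.pyGetD_natCast, pvPrefixA_eq]
  have hlt : j.toNat < nums.length + 1 := by omega
  rw [List.getD_eq_getElem?_getD, List.getElem?_map, List.getElem?_range hlt]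
  rfl

lemma pvPre_last (nums : List Int) :
    PySem.List.pyGetD (pvPrefixA nums) (-1) 0 = pvPS nums nums.length := by
  rw [pvPrefixA_eq, List.range_succ, List.map_append]
  exact PySem.List.pyGetD_neg_one_append_singleton _ _ _

-- ---------- every non-surviving index has a smaller surviving index after it ----------

lemma pvKey1 (nums : List Int) (k : Nat) : ∀ d j, k - j ≤ d → j < k →
    ¬ (∀ t, t < k → j < t → pvA nums j ≤ pvA nums t) →
    ∃ m, j < m ∧ m < k ∧ pvA nums m < pvA nums j ∧ (∀ t, t < k → m < t → pvA nums m ≤ pvA nums t) := by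
  intro d
  induction d with
  | zero => intro j hd hj _; omega
  | succ d ih =>
    intro j hd hj hnot
    push Not at hnot
    obtain ⟨t, htk, hjt, hat⟩ := hnot
    by_cases hts : ∀ s, s < k → t < s → pvA nums t ≤ pvA nums s
    · exact ⟨t, hjt, htk, hat, hts⟩
    · obtain ⟨m, hm1, hm2, hm3, hm4⟩ := ih t (by omega) htk (by push Not at hts ⊢; obtain ⟨s, h1, h2, h3⟩ := hts; exact ⟨s, h1, h2, h3⟩)
      exact ⟨m, by omega, hm2, by omega, hm4⟩

-- ---------- generic list helpers ----------

lemma pv_filter_eq_takeWhile {α : Type} (p : α → Bool) :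
    ∀ l : List α, l.Pairwise (fun x y => p y = true → p x = true) → l.filter p = l.takeWhile p := by
  intro l hl
  induction l with
  | nil => rfl
  | cons x xs ih =>
    rw [List.pairwise_cons] at hl
    by_cases hx : p x = true
    · rw [List.filter_cons_of_pos hx, List.takeWhile_cons_of_pos hx, ih hl.2]
    · rw [List.filter_cons_of_neg hx, List.takeWhile_cons_of_neg hx]
      rw [List.filter_eq_nil_iff.mpr]
      intro y hy hpy
      exact hx (hl.1 y hy hpy)

lemma pv_filter_not_eq_dropWhile {α : Type} (p : α → Bool) :
    ∀ l : List α, l.Pairwise (fun x y => p y = true → p x = true) →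
      l.filter (fun x => !p x) = l.dropWhile p := by
  intro l hl
  induction l with
  | nil => rfl
  | cons x xs ih =>
    rw [List.pairwise_cons] at hl
    by_cases hx : p x = true
    · rw [List.dropWhile_cons_of_pos hx, List.filter_cons_of_neg (by simp [hx]), ih hl.2]
    · rw [List.dropWhile_cons_of_neg hx, List.filter_cons_of_pos (by simp [hx])]
      congr 1
      rw [List.filter_eq_self]
      intro y hy
      simp only [Bool.not_eq_true']
      by_contra hc
      exact hx (hl.1 y hy (by revert hc; cases p y <;> simp))

lemma pv_foldl_const {α β : Type} (f : α → β) :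
    ∀ (l : List α) (s : β) (h : l ≠ []), l.foldl (fun _ i => f i) s = f (l.getLast h) := by
  intro l
  induction l with
  | nil => intro s h; exact absurd rfl h
  | cons x xs ih =>
    intro s h
    cases xs with
    | nil => rfl
    | cons y ys =>
      rw [List.foldl_cons, ih (f x) (by simp), List.getLast_cons (a := x) (by simp)]

lemma pv_head_min {l : List Nat} (h : l.Pairwise (· < ·)) (hne : l ≠ []) :
    ∀ x ∈ l, l.head hne ≤ x := by
  intro x hx
  cases l with
  | nil => exact absurd rfl hne
  | cons a as =>
    rw [List.pairwise_cons] at h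
    rcases List.mem_cons.mp hx with rfl | hmem
    · exact le_refl _
    · exact Nat.le_of_lt (h.1 x hmem)

lemma pv_getLast_max : ∀ {l : List Nat}, l.Pairwise (· < ·) → ∀ (hne : l ≠ []), ∀ x ∈ l, x ≤ l.getLast hne := by
  intro l
  induction l with
  | nil => intro _ hne; exact absurd rfl hne
  | cons a as ih =>
    intro h hne x hx
    rw [List.pairwise_cons] at h
    cases as with
    | nil =>
      have hxa : x = a := by simpa using hx
      subst hxa; simp
    | cons b bs =>
      rw [List.getLast_cons (a := a) (by simp)]
      rcases List.mem_cons.mp hx with rfl | hmem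
      · exact Nat.le_of_lt (h.1 _ (List.getLast_mem (by simp)))
      · exact ih h.2 (by simp) x hmem

-- ---------- the pop loop on an abstract stack ----------

lemma pvPop_eq (nums : List Int) (pre : List Int) (iv v : Int) :
    ∀ (l : List Nat) (res s : Int),
      pvPopA pre iv v res (l.map (pvEntry nums)) s =
        ((l.takeWhile (fun t => decide (v < pvA nums t))).foldl
            (fun r t => max r ((PySem.List.pyGetD pre iv 0 - PySem.List.pyGetD pre (pvStart nums t) 0) * pvA nums t)) res,
         (l.dropWhile (fun t => decide (v < pvA nums t))).map (pvEntry nums),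
         (l.takeWhile (fun t => decide (v < pvA nums t))).foldl (fun _ t => pvStart nums t) s) := by
  intro l
  induction l with
  | nil => intro res s; rfl
  | cons t ts ih =>
    intro res s
    by_cases hv : v < pvA nums t
    · rw [List.map_cons]
      show pvPopA pre iv v res ((pvStart nums t, pvA nums t) :: ts.map (pvEntry nums)) s = _
      rw [pvPopA, if_pos hv]
      rw [ih]
      rw [List.takeWhile_cons_of_pos (by simpa using hv), List.dropWhile_cons_of_pos (by simpa using hv)]
      rfl
    · rw [List.map_cons]
      show pvPopA pre iv v res ((pvStart nums t, pvA nums t) :: ts.map (pvEntry nums)) s = _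
      rw [pvPopA, if_neg hv]
      rw [List.takeWhile_cons_of_neg (by simpa using hv), List.dropWhile_cons_of_neg (by simpa using hv)]
      rfl

lemma pvKey1' (nums : List Int) (k t : Nat) (htk : t < k)
    (hns : ¬ (∀ j, j < k → t < j → pvA nums t ≤ pvA nums j)) :
    ∃ m, t < m ∧ m < k ∧ pvA nums m < pvA nums t ∧ m ∈ pvS nums k := by
  obtain ⟨m, h1, h2, h3, h4⟩ := pvKey1 nums k k t (by omega) htk hns
  exact ⟨m, h1, h2, h3, (mem_pvS nums k m).mpr ⟨h2, h4⟩⟩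

lemma pvS_mono (nums : List Int) (k x y : Nat) (hx : x ∈ pvS nums k) (hy : y ∈ pvS nums k)
    (hxy : x < y) : pvA nums x ≤ pvA nums y := by
  obtain ⟨hx1, hx2⟩ := (mem_pvS nums k x).mp hx
  obtain ⟨hy1, hy2⟩ := (mem_pvS nums k y).mp hy
  exact hx2 y hy1 hxy

lemma pvT_pairwise (nums : List Int) (k : Nat) (v : Int) :
    ((pvS nums k).reverse).Pairwise
      (fun x y => decide (v < pvA nums y) = true → decide (v < pvA nums x) = true) := by
  rw [List.pairwise_reverse]
  refine (pvS_sorted nums k).imp_of_mem ?_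
  intro a b ha hb hab
  simp only [decide_eq_true_eq]
  intro hv
  exact lt_of_lt_of_le hv (pvS_mono nums k a b ha hb hab)

lemma pvS_succ (nums : List Int) (k : Nat) :
    pvS nums (k + 1) =
      ((pvS nums k).filter (fun i => !decide (pvA nums k < pvA nums i))) ++ [k] := by
  have hkk : pvKeep nums (k + 1) k = true := by
    rw [pvKeep_iff]; intro j h1 h2; omega
  have h1 : pvS nums (k + 1) = (List.range k).filter (pvKeep nums (k + 1)) ++ [k] := by
    rw [pvS, List.range_succ, List.filter_append]
    simp [hkk]
  rw [h1]
  congr 1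
  have h2 : ∀ i ∈ List.range k,
      pvKeep nums (k + 1) i = ((fun i => !decide (pvA nums k < pvA nums i)) i && pvKeep nums k i) := by
    intro i hi
    simp only [List.mem_range] at hi
    by_cases hkeep : ∀ j, j < k → i < j → pvA nums i ≤ pvA nums j
    · by_cases hvk : pvA nums i ≤ pvA nums k
      · have : pvKeep nums (k + 1) i = true := by
          rw [pvKeep_iff]; intro j hj1 hj2
          rcases Nat.lt_or_ge j k with h | h
          · exact hkeep j h hj2
          · have : j = k := by omega
            subst this; exact hvk
        rw [this, (pvKeep_iff nums k i).mpr hkeep]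
        simp [not_lt.mpr hvk]
      · have : pvKeep nums (k + 1) i = false := by
          rw [Bool.eq_false_iff]
          intro hc
          exact hvk ((pvKeep_iff nums (k + 1) i).mp hc k (by omega) hi)
        rw [this]
        simp [lt_of_not_ge hvk]
    · have h3 : pvKeep nums (k + 1) i = false := by
        rw [Bool.eq_false_iff]
        intro hc
        apply hkeep
        intro j hj1 hj2
        exact (pvKeep_iff nums (k + 1) i).mp hc j (by omega) hj2
      have h4 : pvKeep nums k i = false := by
        rw [Bool.eq_false_iff]
        intro hc
        exact hkeep ((pvKeep_iff nums k i).mp hc)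
      rw [h3, h4]
      simp
  rw [List.filter_congr h2, ← List.filter_filter, pvS]

lemma pvNewStart (nums : List Int) (k : Nat) (hk : k < nums.length) :
    ((pvS nums k).reverse.takeWhile (fun t => decide (pvA nums k < pvA nums t))).foldl
      (fun _ t => pvStart nums t) ((k : Int)) = pvStart nums k := by
  set v := pvA nums k with hv
  set q : Nat → Bool := fun t => decide (v < pvA nums t) with hq
  have htw : (pvS nums k).reverse.takeWhile q = ((pvS nums k).filter q).reverse := by
    rw [← pv_filter_eq_takeWhile q _ (pvT_pairwise nums k v), List.filter_reverse]
  set fl := (pvS nums k).filter q with hfl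
  rcases eq_or_ne fl [] with hnil | hnil
  · -- nothing is popped
    rw [htw, hnil]
    simp only [List.reverse_nil, List.foldl_nil]
    cases k with
    | zero =>
      have h0 : pvFindLeftI nums v ((0 : Nat) - 1 : Int) = -1 := by
        have := pvFL_neg nums v 0 (by intro t ht; omega)
        simpa using this
      simp only [pvStart]
      rw [show ((0:Nat):Int) - 1 = ((0:Nat):Int) - 1 by norm_num] at h0
      rw [h0]; simp
    | succ m =>
      have hmS : m ∈ pvS nums (m + 1) := by
        rw [mem_pvS]; exact ⟨Nat.lt_succ_self m, by intro j h1 h2; omega⟩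
      have hqm : ¬ (q m = true) := by
        intro hc
        have : m ∈ fl := by rw [hfl, List.mem_filter]; exact ⟨hmS, hc⟩
        rw [hnil] at this; cases this
      have hle : pvA nums m ≤ v := by
        simp only [hq, decide_eq_true_eq] at hqm; omega
      have := pvFL_pos nums v (m + 1) m (Nat.lt_succ_self m) hle (by intro t h1 h2; omega)
      simp only [pvStart, ← hv, this]
      push_cast; ring
  · -- some indices are popped; the last popped one is the head of fl
    have htwne : (pvS nums k).reverse.takeWhile q ≠ [] := by
      rw [htw]
      simp only [ne_eq, List.reverse_eq_nil_iff]
      exact hnil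
    rw [pv_foldl_const _ _ _ htwne]
    have hlast : ((pvS nums k).reverse.takeWhile q).getLast htwne = fl.head hnil := by
      simp only [htw]
      exact List.getLast_reverse _
    rw [hlast]
    set im := fl.head hnil with him
    have him_mem' : im ∈ fl := List.head_mem hnil
    have him_memf : im ∈ (pvS nums k).filter q := by rw [← hfl]; exact him_mem'
    have him_mem : im ∈ pvS nums k := (List.mem_filter.mp him_memf).1
    have hq_im : q im = true := (List.mem_filter.mp him_memf).2
    have him_min : ∀ t ∈ pvS nums k, q t = true → im ≤ t := by
      intro t ht hqt
      have htf : t ∈ fl := by rw [hfl, List.mem_filter]; exact ⟨ht, hqt⟩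
      exact pv_head_min (by rw [hfl]; exact (pvS_sorted nums k).filter q) hnil t htf
    have him_lt_k : im < k := ((mem_pvS _ _ _).mp him_mem).1
    have him_inS := ((mem_pvS _ _ _).mp him_mem).2
    have hvim : v < pvA nums im := by
      have := hq_im; simp only [hq, decide_eq_true_eq] at this; exact this
    set gl := (pvS nums k).filter (fun t => !q t) with hgl
    rcases eq_or_ne gl [] with hgnil | hgnil
    · -- the stack empties completely
      have hallq : ∀ t ∈ pvS nums k, q t = true := by
        intro t ht
        by_contra hc
        have hqt : q t = false := by revert hc; cases q t <;> simp
        have htg : t ∈ gl := by rw [hgl, List.mem_filter]; exact ⟨ht, by rw [hqt]; rfl⟩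
        rw [hgnil] at htg; cases htg
      have hstart_k : pvFindLeftI nums v ((k : Int) - 1) = -1 := by
        apply pvFL_neg
        intro t htk
        by_cases htS : t ∈ pvS nums k
        · have := hallq t htS; simp only [hq, decide_eq_true_eq] at this; exact this
        · have hns : ¬ (∀ j, j < k → t < j → pvA nums t ≤ pvA nums j) := by
            intro hc; exact htS ((mem_pvS nums k t).mpr ⟨htk, hc⟩)
          obtain ⟨m, hm1, hm2, hm3, hm4⟩ := pvKey1' nums k t htk hns
          have := hallq m hm4
          simp only [hq, decide_eq_true_eq] at this
          omega
      have hstart_im : pvFindLeftI nums (pvA nums im) ((im : Int) - 1) = -1 := by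
        apply pvFL_neg
        intro t htim
        by_cases htS : t ∈ pvS nums k
        · exact absurd (him_min t htS (hallq t htS)) (by omega)
        · have htk : t < k := by omega
          have hns : ¬ (∀ j, j < k → t < j → pvA nums t ≤ pvA nums j) := by
            intro hc; exact htS ((mem_pvS nums k t).mpr ⟨htk, hc⟩)
          obtain ⟨m, hm1, hm2, hm3, hm4⟩ := pvKey1' nums k t htk hns
          have himm : im ≤ m := him_min m hm4 (hallq m hm4)
          rcases Nat.eq_or_lt_of_le himm with heq | hlt
          · rw [heq]; exact hm3
          · have := him_inS m hm2 hlt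
            omega
      simp only [pvStart, ← hv, hstart_k, hstart_im]
    · -- a surviving element i' remains below the popped block
      set i' := gl.getLast hgnil with hi'
      have hi'_mem' : i' ∈ gl := List.getLast_mem hgnil
      have hi'_memf : i' ∈ (pvS nums k).filter (fun t => !q t) := by rw [← hgl]; exact hi'_mem'
      have hi'_mem : i' ∈ pvS nums k := (List.mem_filter.mp hi'_memf).1
      have hq_i' : q i' = false := by
        have := (List.mem_filter.mp hi'_memf).2; revert this; cases q i' <;> simp
      have hi'_le : pvA nums i' ≤ v := by
        have hnot : ¬ (v < pvA nums i') := by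
          have h := hq_i'; simp only [hq, decide_eq_false_iff_not] at h; exact h
        omega
      have hi'_max : ∀ t ∈ pvS nums k, q t = false → t ≤ i' := by
        intro t ht hqt
        have htg : t ∈ gl := by rw [hgl, List.mem_filter]; exact ⟨ht, by rw [hqt]; rfl⟩
        exact pv_getLast_max (by rw [hgl]; exact (pvS_sorted nums k).filter _) hgnil t htg
      have hi'_inS := ((mem_pvS _ _ _).mp hi'_mem).2
      have hi'k : i' < k := ((mem_pvS _ _ _).mp hi'_mem).1
      have hC1 : ∀ t, i' < t → t < k → v < pvA nums t := by
        intro t ht1 ht2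
        by_contra hc
        by_cases htS : t ∈ pvS nums k
        · have hqt : q t = false := by simp only [hq]; exact decide_eq_false hc
          exact absurd (hi'_max t htS hqt) (by omega)
        · have hns : ¬ (∀ j, j < k → t < j → pvA nums t ≤ pvA nums j) := by
            intro hc2; exact htS ((mem_pvS nums k t).mpr ⟨ht2, hc2⟩)
          obtain ⟨m, hm1, hm2, hm3, hm4⟩ := pvKey1' nums k t ht2 hns
          have hqm : q m = false := by simp only [hq]; exact decide_eq_false (by omega)
          exact absurd (hi'_max m hm4 hqm) (by omega)
      have hstart_k : pvFindLeftI nums v ((k : Int) - 1) = (i' : Int) :=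
        pvFL_pos nums v k i' hi'k hi'_le hC1
      have hi'im : i' < im := by
        rcases Nat.lt_or_ge i' im with h | h
        · exact h
        · exfalso
          rcases Nat.eq_or_lt_of_le h with heq | hlt
          · rw [heq] at hq_im; rw [hq_im] at hq_i'; cases hq_i'
          · have := him_inS i' hi'k hlt
            omega
      have hbet : ∀ t, i' < t → t < im → pvA nums im < pvA nums t := by
        intro t ht1 ht2
        have htk : t < k := by omega
        by_cases htS : t ∈ pvS nums k
        · have hqt : q t = true := by
            by_contra hc
            have hqt' : q t = false := by revert hc; cases q t <;> simp
            exact absurd (hi'_max t htS hqt') (by omega)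
          exact absurd (him_min t htS hqt) (by omega)
        · have hns : ¬ (∀ j, j < k → t < j → pvA nums t ≤ pvA nums j) := by
            intro hc2; exact htS ((mem_pvS nums k t).mpr ⟨htk, hc2⟩)
          obtain ⟨m, hm1, hm2, hm3, hm4⟩ := pvKey1' nums k t htk hns
          by_contra hc
          have hqm : q m = true := by
            by_contra hc2
            have hqm' : q m = false := by revert hc2; cases q m <;> simp
            exact absurd (hi'_max m hm4 hqm') (by omega)
          have himm : im ≤ m := him_min m hm4 hqm
          rcases Nat.eq_or_lt_of_le himm with heq | hlt
          · rw [← heq] at hm3; omega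
          · have := him_inS m hm2 hlt
            omega
      have ha_i'_im : pvA nums i' ≤ pvA nums im := hi'_inS im him_lt_k hi'im
      have hstart_im : pvFindLeftI nums (pvA nums im) ((im : Int) - 1) = (i' : Int) :=
        pvFL_pos nums (pvA nums im) im i' hi'im ha_i'_im hbet
      simp only [pvStart, ← hv, hstart_k, hstart_im]

lemma pvCand_popped (nums : List Int) (k t : Nat) (hk : k < nums.length)
    (htS : t ∈ pvS nums k) (hqt : pvA nums k < pvA nums t) :
    (PySem.List.pyGetD (pvPrefixA nums) ((k : Int)) 0 -
        PySem.List.pyGetD (pvPrefixA nums) (pvStart nums t) 0) * pvA nums t = pvCand nums t := by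
  obtain ⟨htk, hinS⟩ := (mem_pvS nums k t).mp htS
  have hR : pvR nums t = (k : Int) :=
    pvFR_pos nums (pvA nums t) t k htk hk hqt (fun s h1 h2 => hinS s (by omega) h1)
  have hFL := pvFL_bounds nums (pvA nums t) ((t : Int) - 1) (by omega)
  have hs0 : 0 ≤ pvStart nums t ∧ pvStart nums t ≤ (t : Int) := by unfold pvStart; omega
  rw [pvPre_getD nums ((k : Int)) (by omega) (by omega),
      pvPre_getD nums (pvStart nums t) hs0.1 (by omega)]
  rw [pvCand, hR]
  ring

lemma pvCand_final (nums : List Int) (t : Nat) (htS : t ∈ pvS nums nums.length) :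
    (PySem.List.pyGetD (pvPrefixA nums) (-1) 0 -
        PySem.List.pyGetD (pvPrefixA nums) (pvStart nums t) 0) * pvA nums t = pvCand nums t := by
  obtain ⟨htk, hinS⟩ := (mem_pvS nums nums.length t).mp htS
  have hR : pvR nums t = (nums.length : Int) :=
    pvFR_top nums (pvA nums t) t htk (fun s h1 h2 => hinS s h2 h1)
  have hFL := pvFL_bounds nums (pvA nums t) ((t : Int) - 1) (by omega)
  have hs0 : 0 ≤ pvStart nums t ∧ pvStart nums t ≤ (t : Int) := by unfold pvStart; omega
  rw [pvPre_last, pvPre_getD nums (pvStart nums t) hs0.1 (by omega)]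
  rw [pvCand, hR]
  simp only [Int.toNat_natCast]
  ring

lemma pvPerm_step (nums : List Int) (k : Nat) :
    (pvP nums k ++ ((pvS nums k).reverse).filter (fun t => decide (pvA nums k < pvA nums t))).Perm
      (pvP nums (k + 1)) := by
  rw [List.perm_ext_iff_of_nodup ?nd1 (pvP_nodup nums (k + 1))]
  case nd1 =>
    refine List.Nodup.append (pvP_nodup nums k)
      ((List.nodup_reverse.mpr (pvS_nodup nums k)).filter _) ?_
    intro a haP haF
    have h1 := (mem_pvP nums k a).mp haP
    have h2 := (List.mem_filter.mp haF).1
    rw [List.mem_reverse] at h2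
    exact h1.2 ((mem_pvS nums k a).mp h2).2
  intro x
  constructor
  · intro hx
    rcases List.mem_append.mp hx with hxP | hxF
    · obtain ⟨h1, h2⟩ := (mem_pvP nums k x).mp hxP
      rw [mem_pvP]
      exact ⟨by omega, fun hall => h2 (fun j hj1 hj2 => hall j (by omega) hj2)⟩
    · have hmem := (List.mem_filter.mp hxF).1
      have hqx := (List.mem_filter.mp hxF).2
      rw [List.mem_reverse] at hmem
      obtain ⟨h1, _⟩ := (mem_pvS nums k x).mp hmem
      simp only [decide_eq_true_eq] at hqx
      rw [mem_pvP]
      refine ⟨by omega, fun hall => ?_⟩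
      have := hall k (by omega) h1
      omega
  · intro hx
    obtain ⟨hxk1, hnall⟩ := (mem_pvP nums (k + 1) x).mp hx
    have hxk : x < k := by
      rcases Nat.lt_or_ge x k with h | h
      · exact h
      · exfalso
        exact hnall (fun j hj1 hj2 => by omega)
    by_cases hkeep : ∀ j, j < k → x < j → pvA nums x ≤ pvA nums j
    · refine List.mem_append.mpr (Or.inr ?_)
      rw [List.mem_filter, List.mem_reverse]
      refine ⟨(mem_pvS nums k x).mpr ⟨hxk, hkeep⟩, ?_⟩
      simp only [decide_eq_true_eq]
      by_contra hc
      apply hnall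
      intro j hj1 hj2
      rcases Nat.lt_or_ge j k with h | h
      · exact hkeep j h hj2
      · have : j = k := by omega
        subst this; omega
    · exact List.mem_append.mpr (Or.inl ((mem_pvP nums k x).mpr ⟨hxk, hkeep⟩))

lemma pvPerm_final (nums : List Int) :
    (pvP nums nums.length ++ pvS nums nums.length).Perm (List.range nums.length) := by
  rw [List.perm_ext_iff_of_nodup ?nd1 List.nodup_range]
  case nd1 =>
    refine List.Nodup.append (pvP_nodup nums _) (pvS_nodup nums _) ?_
    intro a haP haS
    exact ((mem_pvP nums _ a).mp haP).2 ((mem_pvS nums _ a).mp haS).2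
  intro x
  constructor
  · intro hx
    rcases List.mem_append.mp hx with h | h
    · exact List.mem_range.mpr ((mem_pvP nums _ x).mp h).1
    · exact List.mem_range.mpr ((mem_pvS nums _ x).mp h).1
  · intro hx
    have hxn := List.mem_range.mp hx
    by_cases hkeep : ∀ j, j < nums.length → x < j → pvA nums x ≤ pvA nums j
    · exact List.mem_append.mpr (Or.inr ((mem_pvS nums _ x).mpr ⟨hxn, hkeep⟩))
    · exact List.mem_append.mpr (Or.inl ((mem_pvP nums _ x).mpr ⟨hxn, hkeep⟩))

/-- the fold of `max` over candidates is permutation-invariant -/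
lemma pvF_perm (nums : List Int) {l1 l2 : List Nat} (h : l1.Perm l2) : pvF nums l1 = pvF nums l2 := by
  unfold pvF
  exact @List.Perm.foldl_eq _ _ _ _ _ ⟨fun b x y => max_right_comm b (pvCand nums x) (pvCand nums y)⟩ h 0

-- ---------- the main invariant ----------

lemma pvMainInv (nums : List Int) : ∀ k, k ≤ nums.length →
    ((List.range k).map (fun (j : Nat) => ((j : Int), pvA nums j))).foldl
      (fun (st : Int × List (Int × Int)) p =>
        let r := pvPopA (pvPrefixA nums) p.1 p.2 st.1 st.2 p.1
        (r.1, (r.2.2, p.2) :: r.2.1))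
      ((0 : Int), ([] : List (Int × Int)))
    = (pvF nums (pvP nums k), ((pvS nums k).reverse).map (pvEntry nums)) := by
  intro k
  induction k with
  | zero =>
    intro _
    simp [pvS, pvP, pvF]
  | succ k ih =>
    intro hk1
    have hk : k < nums.length := hk1
    rw [List.range_succ, List.map_append, List.foldl_append, ih (Nat.le_of_lt hk)]
    simp only [List.map_cons, List.map_nil, List.foldl_cons, List.foldl_nil]
    rw [pvPop_eq]
    have hpair := pvT_pairwise nums k (pvA nums k)
    have htake : ((pvS nums k).reverse).takeWhile (fun t => decide (pvA nums k < pvA nums t)) =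
        ((pvS nums k).reverse).filter (fun t => decide (pvA nums k < pvA nums t)) :=
      (pv_filter_eq_takeWhile _ _ hpair).symm
    have hdrop : ((pvS nums k).reverse).dropWhile (fun t => decide (pvA nums k < pvA nums t)) =
        ((pvS nums k).reverse).filter (fun t => !decide (pvA nums k < pvA nums t)) :=
      (pv_filter_not_eq_dropWhile _ _ hpair).symm
    rw [Prod.mk.injEq]
    constructor
    · -- the running maximum
      rw [htake]
      rw [PySem.List.foldl_congr_mem _ _ (fun r t => max r (pvCand nums t)) _ ?hcg]
      case hcg =>
        intro acc x hx
        have hmem := (List.mem_filter.mp hx).1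
        have hqx := (List.mem_filter.mp hx).2
        rw [List.mem_reverse] at hmem
        simp only [decide_eq_true_eq] at hqx
        rw [pvCand_popped nums k x hk hmem hqx]
      rw [show pvF nums (pvP nums k) = List.foldl (fun r i => max r (pvCand nums i)) 0 (pvP nums k) from rfl,
          ← List.foldl_append]
      exact pvF_perm nums (pvPerm_step nums k)
    · -- the stack
      rw [pvS_succ, List.reverse_append, hdrop, List.filter_reverse]
      simp only [List.reverse_cons, List.reverse_nil, List.nil_append, List.map_cons,
        List.cons_append]
      congr 1
      rw [pvEntry, pvNewStart nums k hk]

lemma pvEnumBridge (nums : List Int) :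
    PySem.List.enumerate nums 0 = (List.range nums.length).map (fun (j : Nat) => ((j : Int), pvA nums j)) := by
  rw [PySem.List.enumerate_eq_map_pyRange nums 0, PySem.List.pyRange_one]
  simp only [PySem.List.len_eq, sub_zero, Int.toNat_natCast, List.map_map]
  apply List.map_congr_left
  intro k hk
  simp [pvA]

lemma pvA_res (nums : List Int) :
    maxSumMinProduct nums = PySem.Int.mod (pvF nums (List.range nums.length)) (10 ^ 9 + 7) := by
  show PySem.Int.mod _ _ = _
  congr 1
  rw [pvEnumBridge, pvMainInv nums nums.length le_rfl]
  simp only [List.map_reverse, List.reverse_reverse]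
  rw [List.foldl_map]
  rw [PySem.List.foldl_congr_mem _ _ (fun r t => max r (pvCand nums t)) _ ?hcg]
  case hcg =>
    intro acc x hx
    simp only [pvEntry]
    rw [pvCand_final nums x hx]
  rw [show pvF nums (pvP nums nums.length) =
        List.foldl (fun r i => max r (pvCand nums i)) 0 (pvP nums nums.length) from rfl,
      ← List.foldl_append]
  exact pvF_perm nums (pvPerm_final nums)

lemma pvB_res (nums : List Int) :
    maxSumMinProduct_alt nums = PySem.Int.mod (pvF nums (List.range nums.length)) (10 ^ 9 + 7) := by
  show PySem.Int.mod _ _ = _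
  congr 1
  rw [show pvPrefixB nums = pvPrefixA nums from rfl]
  rw [PySem.List.pyRange_one]
  simp only [PySem.List.len_eq, sub_zero, Int.toNat_natCast]
  rw [List.foldl_map]
  rw [PySem.List.foldl_congr_mem _ _ (fun r t => max r (pvCand nums t)) _ ?hcg]
  · rfl
  case hcg =>
    intro acc t ht
    have htn : t < nums.length := List.mem_range.mp ht
    simp only [zero_add]
    have hA : PySem.List.pyGetD nums ((t : Nat) : Int) 0 = pvA nums t := by
      rw [PySem.List.pyGetD_natCast]; rfl
    rw [hA]
    have hFLb := pvFL_bounds nums (pvA nums t) ((t : Int) - 1) (by omega)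
    have hFRb := pvFR_bounds nums (pvA nums t) ((t : Int) + 1) (by omega) (by omega)
    rw [pvPre_getD nums _ (by omega : (0:Int) ≤ pvFindRightI nums (pvA nums t) ((t : Int) + 1)) (by omega),
        pvPre_getD nums _ (by omega : (0:Int) ≤ pvFindLeftI nums (pvA nums t) ((t : Int) - 1) + 1) (by omega)]
    rfl

-- ===== VERDICT (by name: the statement is the Claim_ definition above) =====
theorem maxSumMinProduct_spec : Claim_equal_maxSumMinProduct := by
  intro nums _
  unfold Spec_maxSumMinProduct
  rw [pvA_res, pvB_res]
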